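-- pv_equiv track=rewrite | github.com/landron/Problems | hackerrank/python/find_max_bitwise_and.py | find_maxand_brute
-- ===== SOURCE A (Python) =====
-- def find_maxand_brute(limit_nb, limit_max):
--     '''
--         too slow: O(n*n)
--             Result 9998 in 14.14 seconds
--             limit_max = 10^4
--     '''
--     assert limit_max <= limit_nb
--
--     max_bit = 0
--     for i in range(1, limit_nb+1):
--         for j in range(i+1, limit_nb+1):
--             bit = i & j
--             if max_bit < bit < limit_max:
--                 max_bit = bit
--     return max_bit
-- ===== SOURCE B (Python) =====
-- def find_maxand_brute(limit_nb, limit_max):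
--     '''Closed form: the best i&j below limit_max is limit_max-1 when the two
--     smallest numbers whose AND is limit_max-1 (namely limit_max-1 and
--     (limit_max-1)|limit_max) both fit below limit_nb, else limit_max-2.'''
--     assert limit_max <= limit_nb
--     v = limit_max - 1
--     if v < 1:
--         return 0
--     if (v | limit_max) <= limit_nb:
--         return v
--     return v - 1
-- ===== Notes on version B (the rewrite author's own statement) =====
-- stated objective: faster
-- what changed: Replaces the O(n^2) scan over all pairs with a closed-form bit argument: the answer is limit_max-1 when (limit_max-1)|limit_max fits below limit_nb, else limit_max-2 (and 0 when limit_max <= 1).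
import Mathlib
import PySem

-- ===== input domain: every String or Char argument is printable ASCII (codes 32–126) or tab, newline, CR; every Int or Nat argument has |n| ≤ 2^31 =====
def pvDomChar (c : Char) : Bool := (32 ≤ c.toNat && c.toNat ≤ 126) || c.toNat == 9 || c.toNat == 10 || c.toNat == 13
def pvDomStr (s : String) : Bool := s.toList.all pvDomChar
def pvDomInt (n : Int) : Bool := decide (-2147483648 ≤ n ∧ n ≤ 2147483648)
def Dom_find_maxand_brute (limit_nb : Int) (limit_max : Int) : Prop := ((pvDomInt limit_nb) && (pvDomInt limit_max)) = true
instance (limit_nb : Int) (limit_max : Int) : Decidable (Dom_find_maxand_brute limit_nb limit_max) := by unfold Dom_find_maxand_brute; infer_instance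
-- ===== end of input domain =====

-- B replaces A's O(n^2) pair scan by a closed-form bit argument (measured faster, asymptotic).

-- ===== PORT A =====
-- Python's `i & j` on ints is two's-complement bitwise and = Int.land (exact).
def find_maxand_brute (limit_nb : Int) (limit_max : Int) : Int :=
  (PySem.List.pyRange 1 (limit_nb + 1) 1).foldl (fun max_bit i =>
    (PySem.List.pyRange (i + 1) (limit_nb + 1) 1).foldl (fun max_bit j =>
      let bit := Int.land i j
      if max_bit < bit ∧ bit < limit_max then bit else max_bit) max_bit) 0

-- ===== PORT B =====
-- Python's `v | limit_max` = Int.lor (exact).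
def find_maxand_brute_alt (limit_nb : Int) (limit_max : Int) : Int :=
  let v := limit_max - 1
  if v < 1 then 0
  else if Int.lor v limit_max ≤ limit_nb then v
  else v - 1

-- ===== PRECONDITION & SPEC =====
-- A's `assert limit_max <= limit_nb` raises AssertionError otherwise; Pre_ excludes exactly those inputs.
def Pre_find_maxand_brute (limit_nb : Int) (limit_max : Int) : Prop := limit_max ≤ limit_nb
instance (limit_nb : Int) (limit_max : Int) : Decidable (Pre_find_maxand_brute limit_nb limit_max) := by
  unfold Pre_find_maxand_brute; infer_instance
def pvWitness_find_maxand_brute : Int × Int := (8, 5)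
def Spec_find_maxand_brute (limit_nb : Int) (limit_max : Int) (out : Int) : Prop :=
  out = find_maxand_brute_alt limit_nb limit_max
instance (limit_nb : Int) (limit_max : Int) (out : Int) : Decidable (Spec_find_maxand_brute limit_nb limit_max out) := by
  unfold Spec_find_maxand_brute; infer_instance

-- ===== CLAIM (what is proved, stated in full; the proofs are below) =====
def Claim_equal_find_maxand_brute : Prop := ∀ (limit_nb : Int) (limit_max : Int), Dom_find_maxand_brute limit_nb limit_max → Pre_find_maxand_brute limit_nb limit_max → Spec_find_maxand_brute limit_nb limit_max (find_maxand_brute limit_nb limit_max)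

-- ===== LEMMAS AND PROOFS =====

/-- The list of pairs (i, j), 1 ≤ i < j ≤ n, that A's double loop visits. -/
def pvPairs (n : Int) : List (Int × Int) :=
  (PySem.List.pyRange 1 (n + 1) 1).flatMap
    (fun i => (PySem.List.pyRange (i + 1) (n + 1) 1).map (fun j => (i, j)))

/-- One step of A's running maximum. -/
def pvStep (k : Int) (s : Int) (p : Int × Int) : Int :=
  if s < Int.land p.1 p.2 ∧ Int.land p.1 p.2 < k then Int.land p.1 p.2 else s

lemma pvA_eq (n k : Int) :
    find_maxand_brute n k = (pvPairs n).foldl (pvStep k) 0 := by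
  unfold find_maxand_brute pvPairs pvStep
  rw [List.foldl_flatMap]
  simp only [List.foldl_map]

lemma pv_mem_pairs (n : Int) (p : Int × Int) :
    p ∈ pvPairs n ↔ 1 ≤ p.1 ∧ p.1 < p.2 ∧ p.2 ≤ n := by
  unfold pvPairs
  simp only [List.mem_flatMap, List.mem_map, PySem.List.mem_pyRange_one]
  constructor
  · rintro ⟨i, hi, j, hj, rfl⟩
    exact ⟨hi.1, by omega, by omega⟩
  · rintro ⟨h1, h2, h3⟩
    exact ⟨p.1, ⟨h1, by omega⟩, p.2, ⟨by omega, by omega⟩, rfl⟩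

/-- Characterisation of A's running-maximum fold. -/
lemma pv_foldl_char (k : Int) (L : List (Int × Int)) (m : Int) :
    m ≤ L.foldl (pvStep k) m ∧
    (L.foldl (pvStep k) m = m ∨
      ∃ p ∈ L, Int.land p.1 p.2 = L.foldl (pvStep k) m ∧ L.foldl (pvStep k) m < k) ∧
    ∀ p ∈ L, Int.land p.1 p.2 < k → Int.land p.1 p.2 ≤ L.foldl (pvStep k) m := by
  induction L generalizing m with
  | nil => simp
  | cons q L ih =>
    simp only [List.foldl_cons]
    obtain ⟨h1, h2, h3⟩ := ih (pvStep k m q)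
    have hs : m ≤ pvStep k m q ∧
        (pvStep k m q = m ∨ (Int.land q.1 q.2 = pvStep k m q ∧ pvStep k m q < k)) ∧
        (Int.land q.1 q.2 < k → Int.land q.1 q.2 ≤ pvStep k m q) := by
      unfold pvStep
      split_ifs with h
      · exact ⟨le_of_lt h.1, Or.inr ⟨rfl, h.2⟩, fun _ => le_refl _⟩
      · refine ⟨le_refl _, Or.inl rfl, fun hlt => ?_⟩
        rcases not_and_or.mp h with h' | h'
        · exact le_of_not_gt h'
        · exact absurd hlt h'
    refine ⟨hs.1.trans h1, ?_, ?_⟩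
    · rcases h2 with h2 | ⟨p, hp, hpl, hplt⟩
      · rcases hs.2.1 with hq | ⟨hql, hqlt⟩
        · exact Or.inl (h2.trans hq)
        · exact Or.inr ⟨q, List.mem_cons_self, by rw [hql, h2], by rw [h2]; exact hqlt⟩
      · exact Or.inr ⟨p, List.mem_cons_of_mem _ hp, hpl, hplt⟩
    · intro p hp hlt
      rcases List.mem_cons.mp hp with rfl | hp'
      · exact (hs.2.2 hlt).trans h1
      · exact h3 p hp' hlt

-- Nat bit facts --------------------------------------------------------------

lemma pv_absorb (a b : ℕ) : a &&& (a ||| b) = a := by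
  apply Nat.eq_of_testBit_eq
  intro i
  simp only [Nat.testBit_and, Nat.testBit_or]
  cases a.testBit i <;> simp

lemma pv_even_or_succ (a : ℕ) (h : a % 2 = 0) : a ||| (a + 1) = a + 1 := by
  have hx : (a ||| (a + 1)) % 2 = 1 := Nat.or_mod_two_eq_one.mpr (Or.inr (by omega))
  have hd : (a ||| (a + 1)) / 2 = a / 2 := by
    rw [Nat.or_div_two]
    have h2 : (a + 1) / 2 = a / 2 := by omega
    rw [h2, Nat.or_self]
  omega

lemma pv_odd_and_pred (V : ℕ) (h : V % 2 = 1) : (V - 1) &&& V = V - 1 := by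
  have hx : ((V - 1) &&& V) % 2 = 0 := by
    rcases Nat.mod_two_eq_zero_or_one ((V - 1) &&& V) with h0 | h1
    · exact h0
    · have := (Nat.and_mod_two_eq_one.mp h1).1
      omega
  have hd : ((V - 1) &&& V) / 2 = V / 2 := by
    rw [Nat.and_div_two]
    have h2 : (V - 1) / 2 = V / 2 := by omega
    rw [h2, Nat.and_self]
  omega

lemma pv_odd_or_succ (V : ℕ) (h : V % 2 = 1) :
    V ||| (V + 1) = 2 * (V / 2 ||| (V / 2 + 1)) + 1 := by
  have hx : (V ||| (V + 1)) % 2 = 1 := Nat.or_mod_two_eq_one.mpr (Or.inl h)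
  have hd : (V ||| (V + 1)) / 2 = V / 2 ||| (V / 2 + 1) := by
    rw [Nat.or_div_two]
    have h2 : (V + 1) / 2 = V / 2 + 1 := by omega
    rw [h2]
  omega

lemma pv_and_two (u w : ℕ) : (2 * u + 1) &&& (2 * w + 1) = 2 * (u &&& w) + 1 := by
  have hx : ((2 * u + 1) &&& (2 * w + 1)) % 2 = 1 :=
    Nat.and_mod_two_eq_one.mpr ⟨by omega, by omega⟩
  have hd : ((2 * u + 1) &&& (2 * w + 1)) / 2 = u &&& w := by
    rw [Nat.and_div_two]
    have h1 : (2 * u + 1) / 2 = u := by omega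
    have h2 : (2 * w + 1) / 2 = w := by omega
    rw [h1, h2]
  omega

/-- v ||| (v+1) is the smallest strict superset of v's bits. -/
lemma pv_min_superset : ∀ V : ℕ, ∀ j : ℕ, V &&& j = V → V < j → V ||| (V + 1) ≤ j := by
  intro V
  induction V using Nat.strong_induction_on with
  | _ V ih =>
    intro j hsub hlt
    rcases Nat.mod_two_eq_zero_or_one V with hV | hV
    · rw [pv_even_or_succ V hV]; omega
    · have hj : j % 2 = 1 := by
        have h1 : (V &&& j) % 2 = 1 := by rw [hsub]; exact hV
        exact (Nat.and_mod_two_eq_one.mp h1).2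
      have hVu : V = 2 * (V / 2) + 1 := by omega
      have hjw : j = 2 * (j / 2) + 1 := by omega
      have hand : V / 2 &&& j / 2 = V / 2 := by
        have h2 : (2 * (V / 2) + 1) &&& (2 * (j / 2) + 1) = 2 * (V / 2) + 1 := by
          rw [← hVu, ← hjw]; exact hsub
        rw [pv_and_two] at h2
        omega
      have hIH : V / 2 ||| (V / 2 + 1) ≤ j / 2 := ih (V / 2) (by omega) (j / 2) hand (by omega)
      rw [pv_odd_or_succ V hV]
      omega

-- Int ↔ Nat bridges (definitional) -------------------------------------------

lemma pv_land_coe (a b : ℕ) : Int.land (a : ℤ) (b : ℤ) = ((a &&& b : ℕ) : ℤ) := rfl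
lemma pv_lor_coe (a b : ℕ) : Int.lor (a : ℤ) (b : ℤ) = ((a ||| b : ℕ) : ℤ) := rfl

-- Main equivalence ------------------------------------------------------------

lemma pv_main (n k : Int) (hpre : k ≤ n) :
    find_maxand_brute n k = find_maxand_brute_alt n k := by
  obtain ⟨h0, hach, hub⟩ := pv_foldl_char k (pvPairs n) 0
  rw [pvA_eq]
  set r := (pvPairs n).foldl (pvStep k) 0 with hr
  unfold find_maxand_brute_alt
  simp only []
  split_ifs with hv hle
  · -- k ≤ 1 : nothing qualifies, result 0
    rcases hach with h | ⟨p, _, hpl, hplt⟩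
    · exact h
    · omega
  · -- (k-1) ||| k ≤ n : result k - 1
    have hk1 : (1 : ℤ) ≤ k - 1 := by omega
    set V : ℕ := (k - 1).toNat with hV
    have hcV : ((V : ℤ)) = k - 1 := by omega
    have hck : ((V + 1 : ℕ) : ℤ) = k := by push_cast; omega
    have hlor : Int.lor (k - 1) k = ((V ||| (V + 1) : ℕ) : ℤ) := by
      rw [← hcV, ← hck, pv_lor_coe]
    apply le_antisymm
    · rcases hach with h | ⟨p, _, hpl, hplt⟩ <;> omega
    · -- witness pair (k-1, (k-1)|||k)
      have hmem : ((k - 1, Int.lor (k - 1) k) : Int × Int) ∈ pvPairs n := by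
        rw [pv_mem_pairs]
        refine ⟨hk1, ?_, by simpa using hle⟩
        have : V < V ||| (V + 1) := lt_of_lt_of_le (Nat.lt_succ_self V) Nat.right_le_or
        simp only [hlor]
        omega
      have hland : Int.land (k - 1) (Int.lor (k - 1) k) = k - 1 := by
        rw [hlor, ← hcV, pv_land_coe, pv_absorb]
      have := hub _ hmem (by rw [hland]; omega)
      rw [hland] at this
      exact this
  · -- (k-1) ||| k > n : result k - 2
    have hk1 : (1 : ℤ) ≤ k - 1 := by omega
    set V : ℕ := (k - 1).toNat with hV
    have hcV : ((V : ℤ)) = k - 1 := by omega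
    have hck : ((V + 1 : ℕ) : ℤ) = k := by push_cast; omega
    have hlor : Int.lor (k - 1) k = ((V ||| (V + 1) : ℕ) : ℤ) := by
      rw [← hcV, ← hck, pv_lor_coe]
    have hbig : ((V ||| (V + 1) : ℕ) : ℤ) > n := by rw [← hlor]; omega
    -- V must be odd: otherwise V ||| (V+1) = V+1 = k ≤ n
    have hVodd : V % 2 = 1 := by
      rcases Nat.mod_two_eq_zero_or_one V with h | h
      · exfalso
        rw [pv_even_or_succ V h] at hbig
        omega
      · exact h
    -- upper bound: no qualifying pair reaches k - 1
    have hneq : ∀ p ∈ pvPairs n, Int.land p.1 p.2 < k → Int.land p.1 p.2 ≤ k - 2 := by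
      intro p hp hlt
      obtain ⟨h1, h2, h3⟩ := (pv_mem_pairs n p).mp hp
      set A : ℕ := p.1.toNat with hA
      set B : ℕ := p.2.toNat with hB
      have hcA : ((A : ℤ)) = p.1 := by omega
      have hcB : ((B : ℤ)) = p.2 := by omega
      have hlAB : Int.land p.1 p.2 = ((A &&& B : ℕ) : ℤ) := by rw [← hcA, ← hcB, pv_land_coe]
      by_contra hgt
      have hEq : A &&& B = V := by omega
      have hVA : V ≤ A := hEq ▸ Nat.and_le_left
      have hVB : V &&& B = V := by
        have : (A &&& B) &&& B = A &&& B := by rw [Nat.and_assoc, Nat.and_self]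
        rw [hEq] at this
        exact this
      have hVltB : V < B := by omega
      have := pv_min_superset V B hVB hVltB
      omega
    apply le_antisymm
    · rcases hach with h | ⟨p, hp, hpl, hplt⟩
      · omega
      · have := hneq p hp (by rw [hpl]; exact hplt)
        omega
    · by_cases hk2 : k = 2
      · subst hk2; simpa using h0
      · -- k ≥ 3: witness pair (k-2, k-1)
        have hV2 : 2 ≤ V := by omega
        have hmem : ((k - 2, k - 1) : Int × Int) ∈ pvPairs n := by
          rw [pv_mem_pairs]
          exact ⟨by omega, by omega, by omega⟩
        have hcV1 : ((V - 1 : ℕ) : ℤ) = k - 2 := by omega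
        have hland : Int.land (k - 2) (k - 1) = k - 2 := by
          rw [← hcV1, ← hcV, pv_land_coe, pv_odd_and_pred V hVodd]
        have := hub _ hmem (by rw [hland]; omega)
        rw [hland] at this
        omega

-- ===== VERDICT (by name: the statement is the Claim_ definition above) =====
theorem find_maxand_brute_spec : Claim_equal_find_maxand_brute := by
  intro limit_nb limit_max _ hpre
  unfold Spec_find_maxand_brute
  exact pv_main limit_nb limit_max hpre
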